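-- pv_equiv track=rewrite | github.com/miliar/Code_Jam_Webscraper | solutions_python/Problem_170/42.py | solve
-- ===== SOURCE A (Python) =====
-- def solve(sentences):
--   words = set()
--   for s in sentences:
--     for w in s:
--       words.add(w)
--   min_res = len(words)
--
--   set1_e = set()
--   set1_f = set()
--   for w in sentences[0]:
--     set1_e.add(w)
--   for w in sentences[1]:
--     set1_f.add(w)
--
--
--   for i in range(2**(len(sentences)-2)):
--     set_e = set()
--     set_f = set()
--     for j in range(len(sentences)-2):
--       eng = (i & (2**j)) != 0
--       set_x = set_e if eng else set_f
--       for w in sentences[2+j]: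
--         set_x.add(w)
--     mres = len((set_e | set1_e) & (set_f | set1_f))
--     if mres < min_res: min_res = mres
--   return min_res
-- ===== SOURCE B (Python) =====
-- def solve(sentences):
--     def rec(i, e, f):
--         if i == len(sentences):
--             return len(e & f)
--         w = set(sentences[i])
--         return min(rec(i + 1, e | w, f), rec(i + 1, e, f | w))
--     total = set()
--     for s in sentences:
--         total |= set(s)
--     return min(len(total), rec(2, set(sentences[0]), set(sentences[1])))
-- ===== Notes on version B (the rewrite author's own statement) =====
-- stated objective: alternative
-- what changed: Replaces the bitmask enumeration (outer loop over 2^(n-2) masks with an inner bit-testing loop rebuilding both sets per mask) by a recursive branch-and-backtrack search that passes the two word sets down the recursion, taking the min of the two language choices per sentence.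
import Mathlib
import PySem

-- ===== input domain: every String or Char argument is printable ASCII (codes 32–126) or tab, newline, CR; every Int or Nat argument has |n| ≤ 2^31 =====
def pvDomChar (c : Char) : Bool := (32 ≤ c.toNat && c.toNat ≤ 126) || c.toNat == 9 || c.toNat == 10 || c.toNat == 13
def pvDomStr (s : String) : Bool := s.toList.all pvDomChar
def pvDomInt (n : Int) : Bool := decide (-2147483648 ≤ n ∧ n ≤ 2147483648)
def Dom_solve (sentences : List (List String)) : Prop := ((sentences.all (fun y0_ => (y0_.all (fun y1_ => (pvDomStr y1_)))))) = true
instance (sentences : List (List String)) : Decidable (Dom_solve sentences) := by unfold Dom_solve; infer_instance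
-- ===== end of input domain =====

-- B replaces A's bitmask enumeration loop by a recursive two-way branch over each sentence
-- (alternative decomposition); equality of the returned minimum is proved for len(sentences) ≥ 2.


-- ===== PORT A =====
def solve (sentences : List (List String)) : Int :=
  let words : PySem.Set String :=
    sentences.foldl (fun ws s => s.foldl PySem.Set.add ws) PySem.Set.empty
  let min_res : Int := PySem.Set.len words
  let set1_e : PySem.Set String :=
    ((PySem.List.pyGet? sentences 0).getD []).foldl PySem.Set.add PySem.Set.empty
  let set1_f : PySem.Set String :=
    ((PySem.List.pyGet? sentences 1).getD []).foldl PySem.Set.add PySem.Set.empty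
  let m : Nat := sentences.length - 2
  (List.range (2 ^ m)).foldl (fun min_res i =>
    let ef : PySem.Set String × PySem.Set String :=
      (List.range m).foldl (fun p j =>
        if i &&& 2 ^ j ≠ 0 then
          (((PySem.List.pyGet? sentences ((2 + j : Nat) : Int)).getD []).foldl PySem.Set.add p.1, p.2)
        else
          (p.1, ((PySem.List.pyGet? sentences ((2 + j : Nat) : Int)).getD []).foldl PySem.Set.add p.2))
        (PySem.Set.empty, PySem.Set.empty)
    let mres : Int :=
      PySem.Set.len (PySem.Set.inter (PySem.Set.union ef.1 set1_e) (PySem.Set.union ef.2 set1_f))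
    if mres < min_res then mres else min_res) min_res

-- ===== PORT B =====
-- Source B's rec(i, e, f) walks the sentence index from 2 upward; ported as structural
-- recursion on the remaining suffix sentences[i:].
def solveRec : List (List String) → PySem.Set String → PySem.Set String → Int
  | [], e, f => PySem.Set.len (PySem.Set.inter e f)
  | s :: rest, e, f =>
    let w := PySem.Set.ofList s
    min (solveRec rest (PySem.Set.union e w) f) (solveRec rest e (PySem.Set.union f w))

def solve_alt (sentences : List (List String)) : Int :=
  let total : PySem.Set String :=
    sentences.foldl (fun t s => PySem.Set.union t (PySem.Set.ofList s)) PySem.Set.empty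
  min (PySem.Set.len total)
    (solveRec (sentences.drop 2)
      (PySem.Set.ofList ((PySem.List.pyGet? sentences 0).getD []))
      (PySem.Set.ofList ((PySem.List.pyGet? sentences 1).getD [])))

-- ===== PRECONDITION & SPEC =====
-- Pre_ excludes only inputs with fewer than two sentences, where A raises IndexError
-- at sentences[0] / sentences[1] (B raises there too).
def Pre_solve (sentences : List (List String)) : Prop := 2 ≤ sentences.length
instance (sentences : List (List String)) : Decidable (Pre_solve sentences) := by
  unfold Pre_solve; infer_instance

def pvWitness_solve : List (List String) := [["a", "b"], ["b", "c"], ["a"]]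

def Spec_solve (sentences : List (List String)) (out : Int) : Prop := out = solve_alt sentences
instance (sentences : List (List String)) (out : Int) : Decidable (Spec_solve sentences out) := by
  unfold Spec_solve; infer_instance

-- ===== CLAIM (what is proved, stated in full; the proofs are below) =====
def Claim_equal_solve : Prop := ∀ (sentences : List (List String)),
  Dom_solve sentences → Pre_solve sentences → Spec_solve sentences (solve sentences)

-- ===== LEMMAS AND PROOFS =====

-- |s ∩ t| as A and B compute it
def cnt (a b : PySem.Set String) : Int := PySem.Set.len (PySem.Set.inter a b)

-- the pair of sets A's inner loop builds for mask i over j < m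
def buildEF (sentences : List (List String)) (i m : Nat) : PySem.Set String × PySem.Set String :=
  (List.range m).foldl (fun p j =>
    if i &&& 2 ^ j ≠ 0 then
      (((PySem.List.pyGet? sentences ((2 + j : Nat) : Int)).getD []).foldl PySem.Set.add p.1, p.2)
    else
      (p.1, ((PySem.List.pyGet? sentences ((2 + j : Nat) : Int)).getD []).foldl PySem.Set.add p.2))
    (PySem.Set.empty, PySem.Set.empty)

def gA (sentences : List (List String)) (m i : Nat) : Int :=
  cnt (PySem.Set.union (buildEF sentences i m).1
        (PySem.Set.ofList ((PySem.List.pyGet? sentences 0).getD [])))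
      (PySem.Set.union (buildEF sentences i m).2
        (PySem.Set.ofList ((PySem.List.pyGet? sentences 1).getD [])))

-- the set one side of B's recursion accumulates along choice vector bs
def accSide (sel : Bool) : PySem.Set String → List (List String × Bool) → PySem.Set String
  | e, [] => e
  | e, (s, b) :: rest => accSide sel (if b = sel then PySem.Set.union e (PySem.Set.ofList s) else e) rest

def bitsOf (i m : Nat) : List Bool := (List.range m).map (Nat.testBit i)

lemma cnt_congr (a a' b b' : PySem.Set String) (ha : a.Nodup) (ha' : a'.Nodup)
    (hab : ∀ x, x ∈ a ↔ x ∈ a') (hbb : ∀ x, x ∈ b ↔ x ∈ b') : cnt a b = cnt a' b' := by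
  have hperm : a.Perm a' := (List.perm_ext_iff_of_nodup ha ha').mpr hab
  have hcont : ∀ x : String, PySem.Set.contains b x = PySem.Set.contains b' x := by
    intro x
    rw [PySem.Set.contains_eq_decide, PySem.Set.contains_eq_decide]
    simp [hbb x]
  have : (PySem.Set.inter a b).Perm (PySem.Set.inter a' b') := by
    have h1 : PySem.Set.inter a b = a.filter (fun x => PySem.Set.contains b x) := rfl
    have h2 : PySem.Set.inter a' b' = a'.filter (fun x => PySem.Set.contains b' x) := rfl
    rw [h1, h2]
    have : a.filter (fun x => PySem.Set.contains b x)
         = a.filter (fun x => PySem.Set.contains b' x) := by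
      apply List.filter_congr; intro x _; rw [hcont]
    rw [this]; exact hperm.filter _
  show (List.length _ : Int) = (List.length _ : Int)
  rw [this.length_eq]

lemma foldMin_le_init (l : List Int) (a : Int) : l.foldl min a ≤ a := by
  induction l generalizing a with
  | nil => simp
  | cons x l ih => exact le_trans (ih (min a x)) (min_le_left a x)

lemma foldMin_le_mem (l : List Int) (a : Int) (x : Int) (hx : x ∈ l) : l.foldl min a ≤ x := by
  induction l generalizing a with
  | nil => simp at hx
  | cons y l ih =>
    rcases List.mem_cons.mp hx with rfl | hx
    · exact le_trans (foldMin_le_init l (min a x)) (min_le_right a x)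
    · exact ih (min a y) hx

lemma foldMin_eq_or_mem (l : List Int) (a : Int) : l.foldl min a = a ∨ l.foldl min a ∈ l := by
  induction l generalizing a with
  | nil => left; rfl
  | cons x l ih =>
    rcases ih (min a x) with h | h
    · rcases min_choice a x with hm | hm
      · left
        show List.foldl min (min a x) l = a
        rw [h, hm]
      · right
        show List.foldl min (min a x) l ∈ x :: l
        rw [h, hm]
        exact List.mem_cons_self
    · right
      exact List.mem_cons_of_mem _ h

lemma solve_eq (sentences : List (List String)) :
    solve sentences =
      ((List.range (2 ^ (sentences.length - 2))).map (gA sentences (sentences.length - 2))).foldl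
        min (PySem.Set.len
          (sentences.foldl (fun ws s => s.foldl PySem.Set.add ws) PySem.Set.empty)) := by
  have hfun : ∀ (g : Nat → Int),
      (fun (a : Int) (i : Nat) => if g i < a then g i else a)
      = fun (a : Int) (i : Nat) => min a (g i) := by
    intro g; funext a i; rw [min_def]; split_ifs <;> omega
  rw [List.foldl_map]
  simp only [solve, buildEF, gA, cnt]
  rw [hfun]
  rfl

lemma mem_foldl_words (sentences : List (List String)) (init : PySem.Set String) (x : String) :
    x ∈ sentences.foldl (fun ws s => s.foldl PySem.Set.add ws) init
      ↔ x ∈ init ∨ ∃ s ∈ sentences, x ∈ s := by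
  induction sentences generalizing init with
  | nil => simp
  | cons s rest ih =>
    have h : (s.foldl PySem.Set.add init) = PySem.Set.update init s := rfl
    simp only [List.foldl, ih, h, PySem.Set.mem_update, List.mem_cons]
    constructor
    · rintro ((h | h) | ⟨t, ht, hx⟩)
      · exact Or.inl h
      · exact Or.inr ⟨s, Or.inl rfl, h⟩
      · exact Or.inr ⟨t, Or.inr ht, hx⟩
    · rintro (h | ⟨t, (rfl | ht), hx⟩)
      · exact Or.inl (Or.inl h)
      · exact Or.inl (Or.inr hx)
      · exact Or.inr ⟨t, ht, hx⟩

lemma nodup_foldl_words (sentences : List (List String)) (init : PySem.Set String)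
    (h : init.Nodup) :
    (sentences.foldl (fun ws s => s.foldl PySem.Set.add ws) init).Nodup := by
  induction sentences generalizing init with
  | nil => exact h
  | cons s rest ih =>
    refine ih _ ?_
    show (PySem.Set.update init s).Nodup
    exact PySem.Set.nodup_update init s h

lemma mem_foldl_total (sentences : List (List String)) (init : PySem.Set String) (x : String) :
    x ∈ sentences.foldl (fun t s => PySem.Set.union t (PySem.Set.ofList s)) init
      ↔ x ∈ init ∨ ∃ s ∈ sentences, x ∈ s := by
  induction sentences generalizing init with
  | nil => simp
  | cons s rest ih =>
    simp only [List.foldl, ih, PySem.Set.mem_union, PySem.Set.mem_ofList, List.mem_cons]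
    constructor
    · rintro ((h | h) | ⟨t, ht, hx⟩)
      · exact Or.inl h
      · exact Or.inr ⟨s, Or.inl rfl, h⟩
      · exact Or.inr ⟨t, Or.inr ht, hx⟩
    · rintro (h | ⟨t, (rfl | ht), hx⟩)
      · exact Or.inl (Or.inl h)
      · exact Or.inl (Or.inr hx)
      · exact Or.inr ⟨t, ht, hx⟩

lemma nodup_foldl_total (sentences : List (List String)) (init : PySem.Set String)
    (h : init.Nodup) :
    (sentences.foldl (fun t s => PySem.Set.union t (PySem.Set.ofList s)) init).Nodup := by
  induction sentences generalizing init with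
  | nil => exact h
  | cons s rest ih => exact ih _ (PySem.Set.nodup_union _ _ h)

lemma len_words_eq (sentences : List (List String)) :
    PySem.Set.len (sentences.foldl (fun ws s => s.foldl PySem.Set.add ws) PySem.Set.empty)
      = PySem.Set.len
          (sentences.foldl (fun t s => PySem.Set.union t (PySem.Set.ofList s)) PySem.Set.empty) := by
  have hperm : (sentences.foldl (fun ws s => s.foldl PySem.Set.add ws) PySem.Set.empty).Perm
      (sentences.foldl (fun t s => PySem.Set.union t (PySem.Set.ofList s)) PySem.Set.empty) := by
    apply (List.perm_ext_iff_of_nodup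
      (nodup_foldl_words _ _ List.nodup_nil) (nodup_foldl_total _ _ List.nodup_nil)).mpr
    intro x
    rw [mem_foldl_words, mem_foldl_total]
  show (List.length _ : Int) = (List.length _ : Int)
  rw [hperm.length_eq]

lemma mem_accSide (sel : Bool) (ps : List (List String × Bool)) (e : PySem.Set String)
    (x : String) :
    x ∈ accSide sel e ps ↔ x ∈ e ∨ ∃ p ∈ ps, p.2 = sel ∧ x ∈ p.1 := by
  induction ps generalizing e with
  | nil => simp [accSide]
  | cons p rest ih =>
    obtain ⟨s, b⟩ := p
    rw [show accSide sel e ((s, b) :: rest)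
        = accSide sel (if b = sel then PySem.Set.union e (PySem.Set.ofList s) else e) rest from rfl,
      ih]
    by_cases hb : b = sel
    · subst hb
      rw [if_pos rfl]
      simp only [PySem.Set.mem_union, PySem.Set.mem_ofList, List.mem_cons]
      constructor
      · rintro ((h | h) | ⟨q, hq, hsel, hx⟩)
        · exact Or.inl h
        · exact Or.inr ⟨(s, b), Or.inl rfl, rfl, h⟩
        · exact Or.inr ⟨q, Or.inr hq, hsel, hx⟩
      · rintro (h | ⟨q, (rfl | hq), hsel, hx⟩)
        · exact Or.inl (Or.inl h)
        · exact Or.inl (Or.inr hx)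
        · exact Or.inr ⟨q, hq, hsel, hx⟩
    · rw [if_neg hb]
      simp only [List.mem_cons]
      constructor
      · rintro (h | ⟨q, hq, hsel, hx⟩)
        · exact Or.inl h
        · exact Or.inr ⟨q, Or.inr hq, hsel, hx⟩
      · rintro (h | ⟨q, (rfl | hq), hsel, hx⟩)
        · exact Or.inl h
        · exact absurd hsel hb
        · exact Or.inr ⟨q, hq, hsel, hx⟩

lemma nodup_accSide (sel : Bool) (ps : List (List String × Bool)) (e : PySem.Set String)
    (h : e.Nodup) : (accSide sel e ps).Nodup := by
  induction ps generalizing e with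
  | nil => exact h
  | cons p rest ih =>
    obtain ⟨s, b⟩ := p
    rw [show accSide sel e ((s, b) :: rest)
        = accSide sel (if b = sel then PySem.Set.union e (PySem.Set.ofList s) else e) rest from rfl]
    by_cases hb : b = sel
    · rw [if_pos hb]; exact ih _ (PySem.Set.nodup_union _ _ h)
    · rw [if_neg hb]; exact ih _ h

lemma solveRec_le (L : List (List String)) (e f : PySem.Set String) (bs : List Bool)
    (hlen : bs.length = L.length) :
    solveRec L e f ≤ cnt (accSide true e (L.zip bs)) (accSide false f (L.zip bs)) := by
  induction L generalizing e f bs with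
  | nil => simp [solveRec, accSide, cnt]
  | cons s rest ih =>
    match bs with
    | [] => simp at hlen
    | b :: bs =>
      simp only [List.length_cons, Nat.succ.injEq] at hlen
      rcases b with _ | _
      · calc solveRec (s :: rest) e f ≤ solveRec rest e (PySem.Set.union f (PySem.Set.ofList s)) :=
              min_le_right _ _
          _ ≤ _ := by
              have := ih e (PySem.Set.union f (PySem.Set.ofList s)) bs hlen
              simpa [List.zip, accSide] using this
      · calc solveRec (s :: rest) e f ≤ solveRec rest (PySem.Set.union e (PySem.Set.ofList s)) f :=
              min_le_left _ _
          _ ≤ _ := by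
              have := ih (PySem.Set.union e (PySem.Set.ofList s)) f bs hlen
              simpa [List.zip, accSide] using this

lemma solveRec_ex (L : List (List String)) (e f : PySem.Set String) :
    ∃ bs : List Bool, bs.length = L.length ∧
      solveRec L e f = cnt (accSide true e (L.zip bs)) (accSide false f (L.zip bs)) := by
  induction L generalizing e f with
  | nil => exact ⟨[], rfl, rfl⟩
  | cons s rest ih =>
    rcases min_choice (solveRec rest (PySem.Set.union e (PySem.Set.ofList s)) f)
        (solveRec rest e (PySem.Set.union f (PySem.Set.ofList s))) with hm | hm
    · obtain ⟨bs, hlen, heq⟩ := ih (PySem.Set.union e (PySem.Set.ofList s)) f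
      refine ⟨true :: bs, by simp [hlen], ?_⟩
      show min _ _ = _
      rw [hm, heq]; simp [List.zip, accSide]
    · obtain ⟨bs, hlen, heq⟩ := ih e (PySem.Set.union f (PySem.Set.ofList s))
      refine ⟨false :: bs, by simp [hlen], ?_⟩
      show min _ _ = _
      rw [hm, heq]; simp [List.zip, accSide]

lemma bits_surj (bs : List Bool) : ∃ i < 2 ^ bs.length, bitsOf i bs.length = bs := by
  induction bs with
  | nil => exact ⟨0, by simp, rfl⟩
  | cons b bs ih =>
    obtain ⟨i', hi', hbits⟩ := ih
    refine ⟨b.toNat + 2 * i', ?_, ?_⟩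
    · have hb1 : b.toNat ≤ 1 := by rcases b <;> simp
      have h2 : 2 ^ (b :: bs).length = 2 * 2 ^ bs.length := by
        rw [List.length_cons, pow_succ]; ring
      omega
    · show (List.range (b :: bs).length).map (Nat.testBit (b.toNat + 2 * i')) = b :: bs
      rw [List.length_cons, List.range_succ_eq_map, List.map_cons, List.map_map]
      congr 1
      · rcases b <;>
          simp [Nat.testBit_zero, Nat.add_mul_mod_self_left, Nat.mul_mod_right]
      · have hsucc : ∀ j : Nat, (Nat.testBit (b.toNat + 2 * i') ∘ Nat.succ) j = Nat.testBit i' j := by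
          intro j
          show Nat.testBit _ (Nat.succ j) = _
          rw [Nat.testBit_succ]
          congr 1
          have hb1 : b.toNat ≤ 1 := by rcases b <;> simp
          omega
        rw [List.map_congr_left (fun j _ => hsucc j)]
        exact hbits

lemma mem_buildE (sentences : List (List String)) (i : Nat) (m : Nat) (x : String) :
    (x ∈ (buildEF sentences i m).1
      ↔ ∃ j, j < m ∧ Nat.testBit i j = true
          ∧ x ∈ ((PySem.List.pyGet? sentences ((2 + j : Nat) : Int)).getD [])) ∧
    (x ∈ (buildEF sentences i m).2
      ↔ ∃ j, j < m ∧ Nat.testBit i j = false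
          ∧ x ∈ ((PySem.List.pyGet? sentences ((2 + j : Nat) : Int)).getD [])) := by
  induction m with
  | zero => simp [buildEF, PySem.Set.empty]
  | succ m ih =>
    have hstep : buildEF sentences i (m + 1)
        = (fun p : PySem.Set String × PySem.Set String =>
            if i &&& 2 ^ m ≠ 0 then
              (((PySem.List.pyGet? sentences ((2 + m : Nat) : Int)).getD []).foldl PySem.Set.add p.1, p.2)
            else
              (p.1, ((PySem.List.pyGet? sentences ((2 + m : Nat) : Int)).getD []).foldl PySem.Set.add p.2))
          (buildEF sentences i m) := by
      simp [buildEF, List.range_succ, List.foldl_append]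
    have hbit : (i &&& 2 ^ m ≠ 0) ↔ Nat.testBit i m = true := by
      rw [Nat.and_two_pow]
      rcases h : Nat.testBit i m <;> simp
    have hupd : ∀ (p : PySem.Set String) (l : List String),
        l.foldl PySem.Set.add p = PySem.Set.update p l := fun _ _ => rfl
    by_cases hb : Nat.testBit i m = true
    · rw [hstep]
      simp only [if_pos (hbit.mpr hb), hupd, PySem.Set.mem_update]
      constructor
      · rw [ih.1]
        constructor
        · rintro (⟨j, hj, hb', hx⟩ | hx)
          · exact ⟨j, by omega, hb', hx⟩
          · exact ⟨m, by omega, hb, hx⟩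
        · rintro ⟨j, hj, hb', hx⟩
          by_cases hjm : j = m
          · subst hjm; exact Or.inr hx
          · exact Or.inl ⟨j, by omega, hb', hx⟩
      · rw [ih.2]
        constructor
        · rintro ⟨j, hj, hb', hx⟩
          exact ⟨j, by omega, hb', hx⟩
        · rintro ⟨j, hj, hb', hx⟩
          by_cases hjm : j = m
          · subst hjm; rw [hb] at hb'; simp at hb'
          · exact ⟨j, by omega, hb', hx⟩
    · have hb' : Nat.testBit i m = false := by rcases h : Nat.testBit i m <;> simp_all
      rw [hstep]
      simp only [if_neg (fun h => hb (hbit.mp h)), hupd, PySem.Set.mem_update]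
      constructor
      · rw [ih.1]
        constructor
        · rintro ⟨j, hj, hbj, hx⟩
          exact ⟨j, by omega, hbj, hx⟩
        · rintro ⟨j, hj, hbj, hx⟩
          by_cases hjm : j = m
          · subst hjm; rw [hb'] at hbj; simp at hbj
          · exact ⟨j, by omega, hbj, hx⟩
      · rw [ih.2]
        constructor
        · rintro (⟨j, hj, hbj, hx⟩ | hx)
          · exact ⟨j, by omega, hbj, hx⟩
          · exact ⟨m, by omega, hb', hx⟩
        · rintro ⟨j, hj, hbj, hx⟩
          by_cases hjm : j = m
          · subst hjm; exact Or.inr hx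
          · exact Or.inl ⟨j, by omega, hbj, hx⟩

lemma nodup_buildEF (sentences : List (List String)) (i : Nat) (m : Nat) :
    (buildEF sentences i m).1.Nodup ∧ (buildEF sentences i m).2.Nodup := by
  induction m with
  | zero => simp [buildEF, PySem.Set.empty]
  | succ m ih =>
    have hstep : buildEF sentences i (m + 1)
        = (fun p : PySem.Set String × PySem.Set String =>
            if i &&& 2 ^ m ≠ 0 then
              (((PySem.List.pyGet? sentences ((2 + m : Nat) : Int)).getD []).foldl PySem.Set.add p.1, p.2)
            else
              (p.1, ((PySem.List.pyGet? sentences ((2 + m : Nat) : Int)).getD []).foldl PySem.Set.add p.2))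
          (buildEF sentences i m) := by
      simp [buildEF, List.range_succ, List.foldl_append]
    rw [hstep]
    dsimp only
    split_ifs
    · exact ⟨PySem.Set.nodup_update _ _ ih.1, ih.2⟩
    · exact ⟨ih.1, PySem.Set.nodup_update _ _ ih.2⟩

-- membership of one accumulated side along bs, as an indexed statement
lemma mem_accSide_zip (sel : Bool) (L : List (List String)) (bs : List Bool)
    (hlen : bs.length = L.length) (e : PySem.Set String) (x : String) :
    x ∈ accSide sel e (L.zip bs)
      ↔ x ∈ e ∨ ∃ j, ∃ h : j < L.length, bs[j]'(by omega) = sel ∧ x ∈ L[j] := by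
  rw [mem_accSide]
  constructor
  · rintro (h | ⟨p, hp, hsel, hx⟩)
    · exact Or.inl h
    · rcases List.mem_iff_getElem.mp hp with ⟨j, hj, hpj⟩
      have hj' : j < L.length := by
        have := List.length_zip (l₁ := L) (l₂ := bs) ▸ hj; omega
      rw [List.getElem_zip] at hpj
      refine Or.inr ⟨j, hj', ?_, ?_⟩
      · rw [← hsel, ← hpj]
      · rw [← hpj] at hx
        exact hx
  · rintro (h | ⟨j, hj, hsel, hx⟩)
    · exact Or.inl h
    · have hjz : j < (L.zip bs).length := by rw [List.length_zip]; omega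
      refine Or.inr ⟨(L.zip bs)[j], List.getElem_mem hjz, ?_, ?_⟩
      · rw [List.getElem_zip]
        exact hsel
      · rw [List.getElem_zip]
        exact hx

lemma bitsOf_getElem (i m j : Nat) (h : j < m) :
    (bitsOf i m)[j]'(by simpa [bitsOf] using h) = Nat.testBit i j := by
  simp [bitsOf]

lemma gA_eq (sentences : List (List String)) (hn : 2 ≤ sentences.length) (i : Nat)
    (bs : List Bool) (hbs : bs = bitsOf i (sentences.length - 2)) :
    gA sentences (sentences.length - 2) i
      = cnt (accSide true (PySem.Set.ofList ((PySem.List.pyGet? sentences 0).getD []))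
               ((sentences.drop 2).zip bs))
            (accSide false (PySem.Set.ofList ((PySem.List.pyGet? sentences 1).getD []))
               ((sentences.drop 2).zip bs)) := by
  subst hbs
  set m := sentences.length - 2 with hm
  have hLlen : (sentences.drop 2).length = m := by simp [hm]
  have hbslen : (bitsOf i m).length = (sentences.drop 2).length := by
    rw [hLlen]; simp [bitsOf]
  have hget : ∀ j, ∀ hj : j < m,
      ((PySem.List.pyGet? sentences ((2 + j : Nat) : Int)).getD [])
        = (sentences.drop 2)[j]'(by omega) := by
    intro j hj
    rw [PySem.List.pyGet?_natCast, List.getElem?_eq_getElem (by omega), Option.getD_some,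
      List.getElem_drop]
  apply cnt_congr
  · exact PySem.Set.nodup_union _ _ (nodup_buildEF sentences i m).1
  · exact nodup_accSide _ _ _ (PySem.Set.nodup_ofList _)
  · intro x
    rw [PySem.Set.mem_union, (mem_buildE sentences i m x).1,
      mem_accSide_zip true _ _ hbslen]
    constructor
    · rintro (⟨j, hj, hb, hx⟩ | h)
      · refine Or.inr ⟨j, by omega, ?_, ?_⟩
        · rw [bitsOf_getElem i m j hj]
          exact hb
        · rw [hget j hj] at hx
          exact hx
      · exact Or.inl h
    · rintro (h | ⟨j, hj, hb, hx⟩)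
      · exact Or.inr h
      · have hjm : j < m := by omega
        refine Or.inl ⟨j, hjm, ?_, ?_⟩
        · rw [← bitsOf_getElem i m j hjm]
          exact hb
        · rw [hget j hjm]
          exact hx
  · intro x
    rw [PySem.Set.mem_union, (mem_buildE sentences i m x).2,
      mem_accSide_zip false _ _ hbslen]
    constructor
    · rintro (⟨j, hj, hb, hx⟩ | h)
      · refine Or.inr ⟨j, by omega, ?_, ?_⟩
        · rw [bitsOf_getElem i m j hj]
          exact hb
        · rw [hget j hj] at hx
          exact hx
      · exact Or.inl h
    · rintro (h | ⟨j, hj, hb, hx⟩)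
      · exact Or.inr h
      · have hjm : j < m := by omega
        refine Or.inl ⟨j, hjm, ?_, ?_⟩
        · rw [← bitsOf_getElem i m j hjm]
          exact hb
        · rw [hget j hjm]
          exact hx

-- ===== VERDICT (by name: the statement is the Claim_ definition above) =====
theorem solve_spec : Claim_equal_solve := by
  intro sentences _ hpre
  unfold Spec_solve
  have hn : 2 ≤ sentences.length := hpre
  have hLlen : (sentences.drop 2).length = sentences.length - 2 := by simp
  rw [solve_eq sentences,
    show solve_alt sentences
      = min (PySem.Set.len
          (sentences.foldl (fun t s => PySem.Set.union t (PySem.Set.ofList s)) PySem.Set.empty))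
        (solveRec (sentences.drop 2)
          (PySem.Set.ofList ((PySem.List.pyGet? sentences 0).getD []))
          (PySem.Set.ofList ((PySem.List.pyGet? sentences 1).getD []))) from rfl,
    ← len_words_eq sentences]
  apply le_antisymm
  · apply le_min
    · exact foldMin_le_init _ _
    · obtain ⟨bs, hbslen, hrec⟩ := solveRec_ex (sentences.drop 2)
        (PySem.Set.ofList ((PySem.List.pyGet? sentences 0).getD []))
        (PySem.Set.ofList ((PySem.List.pyGet? sentences 1).getD []))
      obtain ⟨i, hi, hbits⟩ := bits_surj bs
      rw [hbslen, hLlen] at hi hbits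
      rw [hrec, ← gA_eq sentences hn i bs hbits.symm]
      exact foldMin_le_mem _ _ _ (List.mem_map.mpr ⟨i, List.mem_range.mpr hi, rfl⟩)
  · rcases foldMin_eq_or_mem
        ((List.range (2 ^ (sentences.length - 2))).map (gA sentences (sentences.length - 2)))
        (PySem.Set.len
          (sentences.foldl (fun ws s => s.foldl PySem.Set.add ws) PySem.Set.empty)) with h | h
    · rw [h]
      exact min_le_left _ _
    · rcases List.mem_map.mp h with ⟨i, _, hgi⟩
      rw [← hgi, gA_eq sentences hn i (bitsOf i (sentences.length - 2)) rfl]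
      exact le_trans (min_le_right _ _)
        (solveRec_le _ _ _ _ (by simp [bitsOf, hLlen]))
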